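-- pv_equiv track=rewrite | github.com/banshee0716/data-structure | binary search/209.minimum-size-subarray-sum.py | slidingWin
-- ===== SOURCE A (Python) =====
-- def slidingWin(target, nums, k):
--     curSum = 0  # 初始化當前子數組的和
--     maxSum = 0  # 初始化最大子數組的和
--     l = 0  # 初始化滑動窗口的左邊界
--
--     # 遍歷數組
--     for i in range(len(nums)):
--         curSum += nums[i]  # 更新當前子數組的和
--
--         # 如果子數組的大小超過 k，則更新左邊界並減去左邊界對應的數值
--         if i > k - 1:
--             curSum -= nums[l]
--             l += 1
--
--         # 更新最大子數組的和
--         maxSum = max(curSum, maxSum)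
--
--     # 檢查最大子數組的和是否大於等於目標值
--     return maxSum >= target
-- ===== SOURCE B (Python) =====
-- def slidingWin(target, nums, k):
--     prefix = [0]
--     for x in nums:
--         prefix.append(prefix[-1] + x)
--     maxSum = 0
--     for i in range(len(nums)):
--         maxSum = max(maxSum, prefix[i + 1] - prefix[max(0, i + 1 - k)])
--     return maxSum >= target
-- ===== Notes on version B (the rewrite author's own statement) =====
-- stated objective: alternative
-- what changed: Replaces A's incremental curSum/left-pointer slide with a precomputed prefix-sum table and index subtraction P[i+1]-P[max(0,i+1-k)]; Pre_ excludes negative k with a nonempty list, where A's degenerate always-empty window returns (0 >= target) but B's prefix index i+1-k runs past the table and raises IndexError.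
-- outside the precondition, e.g. on slidingWin(0, [1], -1): A returns True, B raises IndexError
import Mathlib
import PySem

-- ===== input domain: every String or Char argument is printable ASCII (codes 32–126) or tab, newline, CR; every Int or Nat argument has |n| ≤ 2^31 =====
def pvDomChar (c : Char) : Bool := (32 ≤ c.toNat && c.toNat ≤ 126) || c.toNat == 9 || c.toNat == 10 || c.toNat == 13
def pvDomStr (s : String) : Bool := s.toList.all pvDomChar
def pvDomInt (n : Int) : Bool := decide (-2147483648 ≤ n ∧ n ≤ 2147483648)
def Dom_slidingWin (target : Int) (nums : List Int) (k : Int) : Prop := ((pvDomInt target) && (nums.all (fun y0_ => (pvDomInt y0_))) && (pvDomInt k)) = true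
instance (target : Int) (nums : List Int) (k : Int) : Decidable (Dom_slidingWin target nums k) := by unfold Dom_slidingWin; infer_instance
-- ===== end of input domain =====

-- B replaces A's incremental curSum/left-pointer slide by a precomputed prefix-sum table
-- and index subtraction (objective: alternative; same O(n) cost, differently-shaped pass).

-- ===== PORT A =====
-- the body of A's for-loop (curSum, maxSum, l as the state)
def aStep (nums : List Int) (k : Int) (s : Int × Int × Int) (i : Int) : Int × Int × Int :=
  let curSum := s.1 + PySem.List.pyGetD nums i 0
  if i > k - 1 then
    let curSum2 := curSum - PySem.List.pyGetD nums s.2.2 0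
    (curSum2, max curSum2 s.2.1, s.2.2 + 1)
  else
    (curSum, max curSum s.2.1, s.2.2)

def slidingWin (target : Int) (nums : List Int) (k : Int) : Bool :=
  let st := (PySem.List.pyRange 0 (nums.length : Int) 1).foldl (aStep nums k) (0, 0, 0)
  decide (st.2.1 ≥ target)

-- ===== PORT B =====
-- body of Source B's first loop: append the running sum to prefix
def prefixStep (st : List Int × Int) (x : Int) : List Int × Int :=
  (st.1 ++ [st.2 + x], st.2 + x)

-- body of Source B's second loop: window sum from the prefix table
def bStep (P : List Int) (k : Int) (maxSum : Int) (i : Int) : Int :=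
  max maxSum (PySem.List.pyGetD P (i + 1) 0 - PySem.List.pyGetD P (max 0 (i + 1 - k)) 0)

def slidingWin_alt (target : Int) (nums : List Int) (k : Int) : Bool :=
  let P := (nums.foldl prefixStep ([0], 0)).1
  let maxSum := (PySem.List.pyRange 0 (nums.length : Int) 1).foldl (bStep P k) 0
  decide (maxSum ≥ target)

-- ===== PRECONDITION & SPEC =====
-- Pre_ excludes negative k with a nonempty list: there A's always-empty window yields the
-- degenerate value (0 >= target), while B's prefix index i+1-k runs past the table and raises IndexError.
def Pre_slidingWin (target : Int) (nums : List Int) (k : Int) : Prop := 0 ≤ k ∨ nums = []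
instance (target : Int) (nums : List Int) (k : Int) : Decidable (Pre_slidingWin target nums k) := by unfold Pre_slidingWin; infer_instance
def pvWitness_slidingWin : Int × List Int × Int := (3, [1, 2], 2)

def Spec_slidingWin (target : Int) (nums : List Int) (k : Int) (out : Bool) : Prop := out = slidingWin_alt target nums k
instance (target : Int) (nums : List Int) (k : Int) (out : Bool) : Decidable (Spec_slidingWin target nums k out) := by unfold Spec_slidingWin; infer_instance

-- ===== CLAIM (what is proved, stated in full; the proofs are below) =====
def Claim_equal_slidingWin : Prop := ∀ (target : Int) (nums : List Int) (k : Int), Dom_slidingWin target nums k → Pre_slidingWin target nums k → Spec_slidingWin target nums k (slidingWin target nums k)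

-- ===== LEMMAS AND PROOFS =====

-- prefix sum of the first i elements (i an Int index)
def S (nums : List Int) (i : Int) : Int := (nums.take i.toNat).sum

-- A's left pointer after m loop iterations (for k ≥ 0)
def Lix (k m : Int) : Int := max 0 (m - k)

lemma scanl_get (xs : List Int) (s : Int) (j : Nat) (h : j ≤ xs.length) :
    (List.scanl (· + ·) s xs)[j]'(by rw [List.length_scanl]; omega) = s + (xs.take j).sum := by
  induction xs generalizing s j with
  | nil =>
    cases j with
    | zero => simp
    | succ j => simp at h
  | cons x xs ih =>
    cases j with
    | zero => simp [List.scanl_cons]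
    | succ j =>
      simp only [List.scanl_cons, List.getElem_cons_succ, List.take_succ_cons, List.sum_cons]
      rw [ih (s + x) j (by simpa using h)]
      ring

lemma foldP (xs : List Int) (P : List Int) (s : Int) :
    xs.foldl prefixStep (P ++ [s], s) = (P ++ List.scanl (· + ·) s xs, s + xs.sum) := by
  induction xs generalizing P s with
  | nil => simp [List.scanl_nil]
  | cons x xs ih =>
    simp only [List.foldl_cons, prefixStep, List.scanl_cons, List.sum_cons]
    rw [show P ++ [s] ++ [s + x] = (P ++ [s]) ++ [s + x] from rfl, ih (P ++ [s]) (s + x)]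
    simp [add_assoc]

lemma P_eq (nums : List Int) :
    (nums.foldl prefixStep ([0], 0)).1 = List.scanl (· + ·) 0 nums := by
  have h := foldP nums [] 0
  simp only [List.nil_append] at h
  rw [h]

lemma P_get (nums : List Int) (i : Int) (h0 : 0 ≤ i) (h1 : i ≤ (nums.length : Int)) :
    PySem.List.pyGetD (List.scanl (· + ·) 0 nums) i 0 = S nums i := by
  have hi : i < ((List.scanl (· + ·) 0 nums).length : Int) := by
    rw [List.length_scanl]; push_cast; omega
  rw [PySem.List.pyGetD_eq_getElem _ 0 h0 hi,
      scanl_get nums 0 i.toNat (by omega), zero_add]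
  rfl

lemma nums_get (nums : List Int) (i : Int) (h0 : 0 ≤ i) (h1 : i < (nums.length : Int)) :
    PySem.List.pyGetD nums i 0 = S nums (i + 1) - S nums i := by
  rw [PySem.List.pyGetD_eq_getElem _ 0 h0 h1]
  have ht : (i + 1).toNat = i.toNat + 1 := by omega
  have hlt : i.toNat < nums.length := by omega
  simp only [S, ht, List.sum_take_succ nums i.toNat hlt]
  ring

lemma loop_eq (nums : List Int) (k : Int) (hk : 0 ≤ k) (c : Nat) (hc : c ≤ nums.length) :
    (PySem.List.pyRange 0 (c : Int) 1).foldl (aStep nums k) (0, 0, 0)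
      = (S nums c - S nums (Lix k c),
         (PySem.List.pyRange 0 (c : Int) 1).foldl (bStep (List.scanl (· + ·) 0 nums) k) 0,
         Lix k c) := by
  induction c with
  | zero =>
    have hL : Lix k 0 = 0 := by unfold Lix; omega
    simp [PySem.List.pyRange_one_eq_nil le_rfl, hL, S]
  | succ c ih =>
    have hc' : c ≤ nums.length := by omega
    have hcast : ((c + 1 : Nat) : Int) = (c : Int) + 1 := by push_cast; ring
    have hsplit : PySem.List.pyRange 0 ((c + 1 : Nat) : Int) 1
        = PySem.List.pyRange 0 (c : Int) 1 ++ [(c : Int)] := by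
      rw [hcast, PySem.List.pyRange_one_succ_right (by positivity)]
    rw [hsplit, List.foldl_append, List.foldl_append, ih hc']
    have hLnn : 0 ≤ Lix k (c : Int) := le_max_left _ _
    have hLle : Lix k (c : Int) ≤ (c : Int) := by unfold Lix; omega
    have hclen : (c : Int) < (nums.length : Int) := by exact_mod_cast Nat.lt_of_lt_of_le (Nat.lt_succ_self c) hc
    simp only [List.foldl_cons, List.foldl_nil, aStep, bStep]
    have hleft : max 0 ((c : Int) + 1 - k) = Lix k ((c : Int) + 1) := by unfold Lix; omega
    rw [hleft, nums_get nums (c : Int) (by positivity) hclen]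
    rw [P_get _ ((c : Int) + 1) (by positivity) (by omega),
        P_get _ (Lix k ((c : Int) + 1)) (by unfold Lix; omega) (by unfold Lix; omega)]
    by_cases hbr : (c : Int) > k - 1
    · rw [if_pos hbr]
      rw [nums_get nums (Lix k (c : Int)) hLnn (by omega)]
      have hL1 : Lix k ((c : Int) + 1) = Lix k (c : Int) + 1 := by unfold Lix; omega
      have e : S nums (c : Int) - S nums (Lix k (c : Int))
            + (S nums ((c : Int) + 1) - S nums (c : Int))
            - (S nums (Lix k (c : Int) + 1) - S nums (Lix k (c : Int)))
          = S nums ((c : Int) + 1) - S nums (Lix k (c : Int) + 1) := by ring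
      rw [hcast, hL1, e, max_comm]
    · rw [if_neg hbr]
      have hL0 : Lix k ((c : Int) + 1) = Lix k (c : Int) := by unfold Lix; omega
      have e : S nums (c : Int) - S nums (Lix k (c : Int))
            + (S nums ((c : Int) + 1) - S nums (c : Int))
          = S nums ((c : Int) + 1) - S nums (Lix k (c : Int)) := by ring
      rw [hcast, hL0, e, max_comm]

-- ===== VERDICT (by name: the statement is the Claim_ definition above) =====
theorem slidingWin_spec : Claim_equal_slidingWin := by
  intro target nums k _ hpre
  simp only [Spec_slidingWin, slidingWin, slidingWin_alt]
  rcases hpre with hk | hnil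
  · rw [P_eq, loop_eq nums k hk nums.length le_rfl]
  · subst hnil
    simp [PySem.List.pyRange_one_eq_nil le_rfl]
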